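-- pv_equiv track=rewrite | github.com/ten-jampa/MIT-6.101-programming | recipes/lab.py | combine_recipes
-- ===== SOURCE A (Python) =====
-- def add_recipes(recipe_dicts):
--     """
--     Given a list of recipe dictionaries that map food items to quantities,
--     return a new dictionary that maps each ingredient name
--     to the sum of its quantities across the given recipe dictionaries.
--
--     For example,
--         add_recipes([{'milk':1, 'chocolate':1}, {'sugar':1, 'milk':2}])
--     should return:
--         {'milk':3, 'chocolate': 1, 'sugar': 1}
--     """
--     added_reciped_dict = {}
--     for sub_recipes in recipe_dicts:
--         for key, val in sub_recipes.items():
--             added_reciped_dict[key] = added_reciped_dict.get(key, 0) + val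
--     return added_reciped_dict
--
-- def combine_recipes(nested_recipes):
--     """
--     Given a list of lists of recipe dictionaries, where each inner list
--     represents all the recipes for a certain ingredient, compute and return a
--     list of recipe dictionaries that represent all the possible combinations of
--     ingredient recipes.
--     """
--     ###
--     # Base case
--     if len(nested_recipes) == 1:  # the list only has recipe of one food
--         return nested_recipes[0]
--
--     # Recursive case
--     first, rest = nested_recipes[0], nested_recipes[1:]  # first will be a list
--     # first will be a list of dictionarys
--     out = []
--     for ing_dict1 in first:
--         for ing_dict2 in combine_recipes(rest):
--             out.append(add_recipes([ing_dict1, ing_dict2]))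
--     return out
-- ===== SOURCE B (Python) =====
-- def _merge(d1, d2):
--     out = dict(d1)
--     for key, val in d2.items():
--         out[key] = out.get(key, 0) + val
--     return out
--
-- def combine_recipes(nested_recipes):
--     result = nested_recipes[-1]
--     for level in reversed(nested_recipes[:-1]):
--         result = [_merge(d1, d2) for d1 in level for d2 in result]
--     return result
-- ===== Notes on version B (the rewrite author's own statement) =====
-- stated objective: alternative
-- what changed: Replaces A's recursion that re-calls combine_recipes(rest) inside the outer loop (recomputing the whole tail product once per recipe of the current level) with a single right-to-left iterative pass that builds each level's running product exactly once, via a list comprehension and a direct two-dict merge.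
import Mathlib
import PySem

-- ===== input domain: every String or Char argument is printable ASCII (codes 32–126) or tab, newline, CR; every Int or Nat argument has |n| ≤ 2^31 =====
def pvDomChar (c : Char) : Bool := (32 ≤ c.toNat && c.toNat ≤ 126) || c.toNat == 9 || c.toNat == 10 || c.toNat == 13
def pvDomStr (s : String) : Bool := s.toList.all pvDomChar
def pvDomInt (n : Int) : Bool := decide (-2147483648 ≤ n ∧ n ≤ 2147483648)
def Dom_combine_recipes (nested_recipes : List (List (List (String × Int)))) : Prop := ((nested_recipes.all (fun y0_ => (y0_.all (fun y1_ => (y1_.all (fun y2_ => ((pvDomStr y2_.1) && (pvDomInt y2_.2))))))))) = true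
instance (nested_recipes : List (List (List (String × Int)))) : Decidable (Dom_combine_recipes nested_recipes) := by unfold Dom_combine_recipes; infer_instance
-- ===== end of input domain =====

-- B hoists the tail product out of A's outer loop: one right-to-left iterative pass builds each
-- level's product exactly once, where A re-derives combine_recipes(rest) per element (objective: alternative).

-- ===== PORT A =====
def add_recipes (recipe_dicts : List (List (String × Int))) : List (String × Int) :=
  (recipe_dicts.foldl
      (fun acc sub =>
        sub.foldl (fun a kv => a.insert kv.1 (a.getD kv.1 0 + kv.2)) acc)
      (PySem.Dict.empty)).items

def combine_recipes : List (List (List (String × Int))) → List (List (String × Int))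
  | [] => []          -- Python: nested_recipes[0] raises IndexError here; excluded by Pre_
  | [only] => only
  | first :: rest@(_ :: _) =>
      first.foldl (fun out d1 =>
        (combine_recipes rest).foldl (fun out2 d2 => out2 ++ [add_recipes [d1, d2]]) out) []

-- ===== PORT B =====
def pv_merge (d1 d2 : List (String × Int)) : List (String × Int) :=
  (d2.foldl (fun a kv => a.insert kv.1 (a.getD kv.1 0 + kv.2)) (PySem.Dict.mk d1)).items

def combine_recipes_alt (nested_recipes : List (List (List (String × Int)))) : List (List (String × Int)) :=
  match nested_recipes.reverse with
  | [] => []          -- Python: nested_recipes[-1] raises IndexError here; excluded by Pre_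
  | last :: revRest =>
      revRest.foldl
        (fun result level => level.flatMap (fun d1 => result.map (fun d2 => pv_merge d1 d2)))
        last

-- ===== PRECONDITION & SPEC =====
-- Pre_ excludes the empty list, where A raises IndexError, and inner association lists with a
-- duplicate key, which do not represent any Python dict argument (a dict cannot hold one).
def Pre_combine_recipes (nested_recipes : List (List (List (String × Int)))) : Prop :=
  nested_recipes ≠ [] ∧
    ∀ level ∈ nested_recipes, ∀ d ∈ level, (d.map Prod.fst).Nodup
instance (nested_recipes : List (List (List (String × Int)))) : Decidable (Pre_combine_recipes nested_recipes) := by unfold Pre_combine_recipes; infer_instance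

def pvWitness_combine_recipes : (List (List (List (String × Int)))) :=
  ([[[("milk", 1), ("chocolate", 1)]], [[("sugar", 1), ("milk", 2)], [("cocoa", 3)]]])

def Spec_combine_recipes (nested_recipes : List (List (List (String × Int)))) (out : List (List (String × Int))) : Prop := out = combine_recipes_alt nested_recipes
instance (nested_recipes : List (List (List (String × Int)))) (out : List (List (String × Int))) : Decidable (Spec_combine_recipes nested_recipes out) := by unfold Spec_combine_recipes; infer_instance

-- ===== CLAIM (what is proved, stated in full; the proofs are below) =====
def Claim_equal_combine_recipes : Prop := ∀ (nested_recipes : List (List (List (String × Int)))), Dom_combine_recipes nested_recipes → Pre_combine_recipes nested_recipes → Spec_combine_recipes nested_recipes (combine_recipes nested_recipes)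

-- ===== LEMMAS AND PROOFS =====

-- A loop inserting fresh, pairwise-distinct keys appends the pairs to the dict's items.
lemma items_foldl_insert_getD_fresh (l : List (String × Int)) :
    ∀ (d : PySem.Dict String Int), (l.map Prod.fst).Nodup →
      (∀ p ∈ l, d.contains p.1 = false) →
      (l.foldl (fun a kv => a.insert kv.1 (a.getD kv.1 0 + kv.2)) d).items = d.items ++ l := by
  induction l with
  | nil => intro d _ _; simp
  | cons p t ih =>
    intro d hnd hf
    have hpf : d.contains p.1 = false := hf p (by simp)
    have hstep : d.insert p.1 (d.getD p.1 0 + p.2) = d.insert p.1 p.2 := by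
      rw [PySem.Dict.getD_of_not_contains d 0 hpf, Int.zero_add]
    simp only [List.foldl_cons, hstep]
    rw [ih (d.insert p.1 p.2) (by simpa using hnd.of_cons)
        (by
          intro q hq
          have hne : q.1 ≠ p.1 := by
            simp only [List.map_cons, List.nodup_cons] at hnd
            intro h
            exact hnd.1 (h ▸ List.mem_map_of_mem hq)
          rw [PySem.Dict.contains_insert d p.1 q.1 p.2]
          simp [hne, hf q (List.mem_cons_of_mem _ hq)])]
    rw [PySem.Dict.items_insert_of_not_contains d p.2 hpf]
    simp

-- A's pairwise merge equals B's direct merge when the left dict has unique keys.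
lemma add_eq_merge (d1 d2 : List (String × Int)) (h : (d1.map Prod.fst).Nodup) :
    add_recipes [d1, d2] = pv_merge d1 d2 := by
  have hbase :
      d1.foldl (fun a kv => a.insert kv.1 (a.getD kv.1 0 + kv.2)) (PySem.Dict.empty) =
        PySem.Dict.mk d1 := by
    apply PySem.Dict.ext
    rw [items_foldl_insert_getD_fresh d1 PySem.Dict.empty h
        (by intro p _; exact PySem.Dict.contains_empty p.1)]
    simp [PySem.Dict.empty]
  simp only [add_recipes, pv_merge, List.foldl_cons, List.foldl_nil, hbase]

-- A's nested append loops are a flatMap of maps.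
lemma a_cons (a b : List (List (String × Int))) (t : List (List (List (String × Int)))) :
    combine_recipes (a :: b :: t) =
      a.flatMap (fun d1 => (combine_recipes (b :: t)).map (fun d2 => add_recipes [d1, d2])) := by
  rw [combine_recipes]
  simp only [PySem.List.foldl_append_singleton_eq_map, PySem.List.foldl_append_eq_flatMap,
    List.nil_append]

-- B's right-to-left fold peels one level off the front.
lemma alt_cons (a : List (List (String × Int))) (rest : List (List (List (String × Int))))
    (h : rest ≠ []) :
    combine_recipes_alt (a :: rest) =
      a.flatMap (fun d1 => (combine_recipes_alt rest).map (fun d2 => pv_merge d1 d2)) := by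
  obtain ⟨l, rr, hrev⟩ : ∃ l rr, rest.reverse = l :: rr := by
    cases hr : rest.reverse with
    | nil => exact absurd (by simpa using hr) h
    | cons l rr => exact ⟨l, rr, rfl⟩
  have h2 : (a :: rest).reverse = l :: (rr ++ [a]) := by
    rw [List.reverse_cons, hrev]; rfl
  simp only [combine_recipes_alt, h2, hrev, List.foldl_append, List.foldl_cons, List.foldl_nil]

lemma main_equiv :
    ∀ (xs : List (List (List (String × Int)))), xs ≠ [] →
      (∀ level ∈ xs, ∀ d ∈ level, (d.map Prod.fst).Nodup) →
      combine_recipes xs = combine_recipes_alt xs := by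
  intro xs
  induction xs with
  | nil => intro h; exact absurd rfl h
  | cons a rest ih =>
    intro _ hnd
    cases rest with
    | nil => simp [combine_recipes, combine_recipes_alt]
    | cons b t =>
      rw [a_cons, alt_cons a (b :: t) (by simp)]
      rw [← ih (by simp) (fun level hl => hnd level (List.mem_cons_of_mem _ hl))]
      refine List.flatMap_congr ?_
      intro d1 hd1
      refine List.map_congr_left ?_
      intro d2 _
      exact add_eq_merge d1 d2 (hnd a (by simp) d1 hd1)

-- ===== VERDICT (by name: the statement is the Claim_ definition above) =====
theorem combine_recipes_spec : Claim_equal_combine_recipes := by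
  intro xs _ hpre
  unfold Spec_combine_recipes
  exact main_equiv xs hpre.1 hpre.2
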